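-- pv_equiv track=rewrite | github.com/tomowama/BobaBot-2.0 | GameState.py | readableMoves
-- ===== SOURCE A (Python) =====
-- rows = [range(110,118),range(98,106),range(86,94),range(74,82), range(62,70), range(50,58), range(38,46),range(26,34)]
--
-- columns = [range(26,120, 12), range(27,121,12), range(28,122,12), range(29,123,12), range(30,124,12), range(31,125,12), range(32,126,12), range(33,127,12)]
--
-- col = {
-- 	0: 'a',
-- 	1: 'b',
-- 	2: 'c',
-- 	3: 'd',
-- 	4: 'e',
-- 	5: 'f',
-- 	6: 'g',
-- 	7: 'h'
-- }
--
-- def readableMoves(moves):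
-- 	readableMoves = []
-- 	startRow = 0
-- 	endRow = 0
-- 	startCol = ''
-- 	endCol = ''
-- 	for move in moves:
-- 		for i in range(0,8):
-- 			if move[0] in rows[i]:
-- 				startRow = i+1
-- 			if move[1] in rows[i]:
-- 				endRow = i+1
-- 		for i in range(0,8):
-- 			if move[0] in columns[i]:
-- 				startCol = col[i]
-- 			if move[1] in columns[i]:
-- 				endCol = col[i]
-- 		readableMoves.append([startCol + str(startRow), endCol + str(endRow)])
--
-- 	return readableMoves
-- ===== SOURCE B (Python) =====
-- rows = [range(110,118),range(98,106),range(86,94),range(74,82), range(62,70), range(50,58), range(38,46),range(26,34)]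
--
-- columns = [range(26,120, 12), range(27,121,12), range(28,122,12), range(29,123,12), range(30,124,12), range(31,125,12), range(32,126,12), range(33,127,12)]
--
-- col = {
-- 	0: 'a',
-- 	1: 'b',
-- 	2: 'c',
-- 	3: 'd',
-- 	4: 'e',
-- 	5: 'f',
-- 	6: 'g',
-- 	7: 'h'
-- }
--
-- def readableMoves(moves):
-- 	# The board constants encode square v=26+d, 0<=d<=91, d%12<8:
-- 	# row = 8 - d//12, column letter = 'abcdefgh'[d%12]; off-board
-- 	# positions keep the previous coordinate, as in the original.
-- 	out = []
-- 	sr, er, sc, ec = 0, 0, '', ''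
-- 	for move in moves:
-- 		d = move[0] - 26
-- 		if 0 <= d <= 91 and d % 12 < 8:
-- 			sr, sc = 8 - d // 12, 'abcdefgh'[d % 12]
-- 		e = move[1] - 26
-- 		if 0 <= e <= 91 and e % 12 < 8:
-- 			er, ec = 8 - e // 12, 'abcdefgh'[e % 12]
-- 		out.append([sc + str(sr), ec + str(er)])
-- 	return out
-- ===== Notes on version B (the rewrite author's own statement) =====
-- stated objective: simpler
-- what changed: A rescans the eight row ranges and eight column ranges for every move; B drops the range tables entirely and computes each coordinate by closed-form arithmetic on d = value - 26 (row = 8 - d//12, letter = 'abcdefgh'[d%12] when 0 <= d <= 91 and d%12 < 8), keeping the same carry-over of stale coordinates for off-board values.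
import Mathlib
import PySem

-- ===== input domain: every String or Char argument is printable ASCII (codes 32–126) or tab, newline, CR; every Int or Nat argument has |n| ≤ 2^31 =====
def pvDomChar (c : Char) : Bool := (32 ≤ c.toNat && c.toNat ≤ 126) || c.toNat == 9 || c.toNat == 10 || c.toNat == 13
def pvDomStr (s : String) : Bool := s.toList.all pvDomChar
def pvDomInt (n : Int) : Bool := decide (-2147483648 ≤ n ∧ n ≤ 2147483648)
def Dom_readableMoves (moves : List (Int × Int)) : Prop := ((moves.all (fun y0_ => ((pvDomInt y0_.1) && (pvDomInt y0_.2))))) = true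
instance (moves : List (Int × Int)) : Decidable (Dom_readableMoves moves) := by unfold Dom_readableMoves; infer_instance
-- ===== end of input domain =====

set_option maxRecDepth 10000
set_option maxHeartbeats 1000000


-- B drops A's per-move scans over the eight row / eight column ranges and computes each
-- coordinate by closed-form arithmetic on d = value - 26 (objective: simpler).

-- ===== PORT A =====
-- module constants: rows, columns (lists of range objects) and the col dict
def pyRows : List (List Int) :=
  [PySem.List.pyRange 110 118 1, PySem.List.pyRange 98 106 1, PySem.List.pyRange 86 94 1,
   PySem.List.pyRange 74 82 1, PySem.List.pyRange 62 70 1, PySem.List.pyRange 50 58 1,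
   PySem.List.pyRange 38 46 1, PySem.List.pyRange 26 34 1]

def pyColumns : List (List Int) :=
  [PySem.List.pyRange 26 120 12, PySem.List.pyRange 27 121 12, PySem.List.pyRange 28 122 12,
   PySem.List.pyRange 29 123 12, PySem.List.pyRange 30 124 12, PySem.List.pyRange 31 125 12,
   PySem.List.pyRange 32 126 12, PySem.List.pyRange 33 127 12]

def pyCol : PySem.Dict Int String :=
  PySem.Dict.ofList [((0 : Int), "a"), (1, "b"), (2, "c"), (3, "d"), (4, "e"), (5, "f"), (6, "g"), (7, "h")]

-- loop body of A: the two `for i in range(0,8)` scans, then the append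
-- (rows[i] / columns[i] indexed with i ∈ [0,8) always succeeds, hence the inert `.getD` defaults;
--  likewise col[i] always hits a key)
def stepA (st : List (List String) × Int × Int × String × String) (move : Int × Int) :
    List (List String) × Int × Int × String × String :=
  let rc := (PySem.List.pyRange 0 8 1).foldl (fun p i =>
      (if ((PySem.List.pyGet? pyRows i).getD []).contains move.1 then i + 1 else p.1,
       if ((PySem.List.pyGet? pyRows i).getD []).contains move.2 then i + 1 else p.2))
    (st.2.1, st.2.2.1)
  let cc := (PySem.List.pyRange 0 8 1).foldl (fun p i =>
      (if ((PySem.List.pyGet? pyColumns i).getD []).contains move.1 then (pyCol.get? i).getD "" else p.1,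
       if ((PySem.List.pyGet? pyColumns i).getD []).contains move.2 then (pyCol.get? i).getD "" else p.2))
    (st.2.2.2.1, st.2.2.2.2)
  (st.1 ++ [[cc.1 ++ PySem.Int.toStr rc.1, cc.2 ++ PySem.Int.toStr rc.2]], rc.1, rc.2, cc.1, cc.2)

def readableMoves (moves : List (Int × Int)) : List (List String) :=
  (moves.foldl stepA ([], 0, 0, "", "")).1

-- ===== PORT B =====
-- loop body of B: closed-form arithmetic on d = value - 26; the string index d % 12 is
-- in range whenever the branch is taken, hence the inert `.getD ""`
def stepB (st : List (List String) × Int × Int × String × String) (move : Int × Int) :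
    List (List String) × Int × Int × String × String :=
  let d := move.1 - 26
  let s := if 0 ≤ d ∧ d ≤ 91 ∧ PySem.Int.mod d 12 < 8 then
      (8 - PySem.Int.floordiv d 12, ((PySem.Str.pyGet? "abcdefgh" (PySem.Int.mod d 12)).map (fun c => c.toString)).getD "")
    else (st.2.1, st.2.2.2.1)
  let e := move.2 - 26
  let t := if 0 ≤ e ∧ e ≤ 91 ∧ PySem.Int.mod e 12 < 8 then
      (8 - PySem.Int.floordiv e 12, ((PySem.Str.pyGet? "abcdefgh" (PySem.Int.mod e 12)).map (fun c => c.toString)).getD "")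
    else (st.2.2.1, st.2.2.2.2)
  (st.1 ++ [[s.2 ++ PySem.Int.toStr s.1, t.2 ++ PySem.Int.toStr t.1]], s.1, t.1, s.2, t.2)

def readableMoves_alt (moves : List (Int × Int)) : List (List String) :=
  (moves.foldl stepB ([], 0, 0, "", "")).1

-- ===== PRECONDITION & SPEC =====
def Spec_readableMoves (moves : List (Int × Int)) (out : List (List String)) : Prop := out = readableMoves_alt moves
instance (moves : List (Int × Int)) (out : List (List String)) : Decidable (Spec_readableMoves moves out) := by unfold Spec_readableMoves; infer_instance

-- ===== CLAIM (what is proved, stated in full; the proofs are below) =====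
def Claim_equal_readableMoves : Prop := ∀ (moves : List (Int × Int)), Dom_readableMoves moves → Spec_readableMoves moves (readableMoves moves)

-- ===== LEMMAS AND PROOFS =====

-- closed forms of one row scan / one column scan (proof-only helpers)
def rowName (v s : Int) : Int :=
  if 26 ≤ v ∧ v < 34 then 8 else if 38 ≤ v ∧ v < 46 then 7 else if 50 ≤ v ∧ v < 58 then 6 else
  if 62 ≤ v ∧ v < 70 then 5 else if 74 ≤ v ∧ v < 82 then 4 else if 86 ≤ v ∧ v < 94 then 3 else
  if 98 ≤ v ∧ v < 106 then 2 else if 110 ≤ v ∧ v < 118 then 1 else s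

def colName (v : Int) (s : String) : String :=
  if 26 ≤ v ∧ v < 120 ∧ 12 ∣ v - 26 then "a" else
  if 27 ≤ v ∧ v < 121 ∧ 12 ∣ v - 27 then "b" else
  if 28 ≤ v ∧ v < 122 ∧ 12 ∣ v - 28 then "c" else
  if 29 ≤ v ∧ v < 123 ∧ 12 ∣ v - 29 then "d" else
  if 30 ≤ v ∧ v < 124 ∧ 12 ∣ v - 30 then "e" else
  if 31 ≤ v ∧ v < 125 ∧ 12 ∣ v - 31 then "f" else
  if 32 ≤ v ∧ v < 126 ∧ 12 ∣ v - 32 then "g" else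
  if 33 ≤ v ∧ v < 127 ∧ 12 ∣ v - 33 then "h" else s

lemma row_scan (v s : Int) :
    (PySem.List.pyRange 0 8 1).foldl
      (fun p i => if ((PySem.List.pyGet? pyRows i).getD []).contains v then i + 1 else p) s
    = rowName v s := by
  rw [show PySem.List.pyRange 0 8 1 = [0, 1, 2, 3, 4, 5, 6, 7] from by decide]
  simp only [List.foldl,
    show (PySem.List.pyGet? pyRows 0).getD [] = PySem.List.pyRange 110 118 1 from rfl,
    show (PySem.List.pyGet? pyRows 1).getD [] = PySem.List.pyRange 98 106 1 from rfl,
    show (PySem.List.pyGet? pyRows 2).getD [] = PySem.List.pyRange 86 94 1 from rfl,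
    show (PySem.List.pyGet? pyRows 3).getD [] = PySem.List.pyRange 74 82 1 from rfl,
    show (PySem.List.pyGet? pyRows 4).getD [] = PySem.List.pyRange 62 70 1 from rfl,
    show (PySem.List.pyGet? pyRows 5).getD [] = PySem.List.pyRange 50 58 1 from rfl,
    show (PySem.List.pyGet? pyRows 6).getD [] = PySem.List.pyRange 38 46 1 from rfl,
    show (PySem.List.pyGet? pyRows 7).getD [] = PySem.List.pyRange 26 34 1 from rfl,
    List.contains_eq_mem, PySem.List.mem_pyRange_one, decide_eq_true_eq, rowName]
  split_ifs <;> omega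

lemma col_scan (v : Int) (s : String) :
    (PySem.List.pyRange 0 8 1).foldl
      (fun p i => if ((PySem.List.pyGet? pyColumns i).getD []).contains v then (pyCol.get? i).getD "" else p) s
    = colName v s := by
  rw [show PySem.List.pyRange 0 8 1 = [0, 1, 2, 3, 4, 5, 6, 7] from by decide]
  simp only [List.foldl,
    show (PySem.List.pyGet? pyColumns 0).getD [] = PySem.List.pyRange 26 120 12 from rfl,
    show (PySem.List.pyGet? pyColumns 1).getD [] = PySem.List.pyRange 27 121 12 from rfl,
    show (PySem.List.pyGet? pyColumns 2).getD [] = PySem.List.pyRange 28 122 12 from rfl,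
    show (PySem.List.pyGet? pyColumns 3).getD [] = PySem.List.pyRange 29 123 12 from rfl,
    show (PySem.List.pyGet? pyColumns 4).getD [] = PySem.List.pyRange 30 124 12 from rfl,
    show (PySem.List.pyGet? pyColumns 5).getD [] = PySem.List.pyRange 31 125 12 from rfl,
    show (PySem.List.pyGet? pyColumns 6).getD [] = PySem.List.pyRange 32 126 12 from rfl,
    show (PySem.List.pyGet? pyColumns 7).getD [] = PySem.List.pyRange 33 127 12 from rfl,
    show (pyCol.get? 0).getD "" = "a" from rfl, show (pyCol.get? 1).getD "" = "b" from rfl,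
    show (pyCol.get? 2).getD "" = "c" from rfl, show (pyCol.get? 3).getD "" = "d" from rfl,
    show (pyCol.get? 4).getD "" = "e" from rfl, show (pyCol.get? 5).getD "" = "f" from rfl,
    show (pyCol.get? 6).getD "" = "g" from rfl, show (pyCol.get? 7).getD "" = "h" from rfl,
    List.contains_eq_mem, PySem.List.mem_pyRange_iff_of_pos (by norm_num : (0:Int) < 12),
    decide_eq_true_eq, colName]
  split_ifs <;> first | rfl | omega

-- B's arithmetic branch equals the two closed forms
lemma arith_row (v s : Int) :
    (if 0 ≤ v - 26 ∧ v - 26 ≤ 91 ∧ PySem.Int.mod (v - 26) 12 < 8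
     then 8 - PySem.Int.floordiv (v - 26) 12 else s) = rowName v s := by
  rw [PySem.Int.mod_eq_emod_of_pos (by norm_num), PySem.Int.floordiv_eq_ediv_of_pos (by norm_num)]
  unfold rowName
  split_ifs <;> omega

lemma arith_col (v : Int) (s : String) :
    (if 0 ≤ v - 26 ∧ v - 26 ≤ 91 ∧ PySem.Int.mod (v - 26) 12 < 8
     then ((PySem.Str.pyGet? "abcdefgh" (PySem.Int.mod (v - 26) 12)).map (fun c => c.toString)).getD "" else s) = colName v s := by
  rw [PySem.Int.mod_eq_emod_of_pos (by norm_num)]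
  by_cases hP : 0 ≤ v - 26 ∧ v - 26 ≤ 91 ∧ (v - 26) % 12 < 8
  · rw [if_pos hP]
    unfold colName
    have h0 : 0 ≤ (v - 26) % 12 := Int.emod_nonneg _ (by norm_num)
    rcases (by omega : (v - 26) % 12 = 0 ∨ (v - 26) % 12 = 1 ∨ (v - 26) % 12 = 2 ∨ (v - 26) % 12 = 3 ∨ (v - 26) % 12 = 4 ∨ (v - 26) % 12 = 5 ∨ (v - 26) % 12 = 6 ∨ (v - 26) % 12 = 7) with hk|hk|hk|hk|hk|hk|hk|hk
    · rw [hk, if_pos (show 26 ≤ v ∧ v < 120 ∧ 12 ∣ v - 26 by omega)]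
      rfl
    · rw [hk, if_neg (show ¬(26 ≤ v ∧ v < 120 ∧ 12 ∣ v - 26) by omega), if_pos (show 27 ≤ v ∧ v < 121 ∧ 12 ∣ v - 27 by omega)]
      rfl
    · rw [hk, if_neg (show ¬(26 ≤ v ∧ v < 120 ∧ 12 ∣ v - 26) by omega), if_neg (show ¬(27 ≤ v ∧ v < 121 ∧ 12 ∣ v - 27) by omega), if_pos (show 28 ≤ v ∧ v < 122 ∧ 12 ∣ v - 28 by omega)]
      rfl
    · rw [hk, if_neg (show ¬(26 ≤ v ∧ v < 120 ∧ 12 ∣ v - 26) by omega), if_neg (show ¬(27 ≤ v ∧ v < 121 ∧ 12 ∣ v - 27) by omega), if_neg (show ¬(28 ≤ v ∧ v < 122 ∧ 12 ∣ v - 28) by omega), if_pos (show 29 ≤ v ∧ v < 123 ∧ 12 ∣ v - 29 by omega)]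
      rfl
    · rw [hk, if_neg (show ¬(26 ≤ v ∧ v < 120 ∧ 12 ∣ v - 26) by omega), if_neg (show ¬(27 ≤ v ∧ v < 121 ∧ 12 ∣ v - 27) by omega), if_neg (show ¬(28 ≤ v ∧ v < 122 ∧ 12 ∣ v - 28) by omega), if_neg (show ¬(29 ≤ v ∧ v < 123 ∧ 12 ∣ v - 29) by omega), if_pos (show 30 ≤ v ∧ v < 124 ∧ 12 ∣ v - 30 by omega)]
      rfl
    · rw [hk, if_neg (show ¬(26 ≤ v ∧ v < 120 ∧ 12 ∣ v - 26) by omega), if_neg (show ¬(27 ≤ v ∧ v < 121 ∧ 12 ∣ v - 27) by omega), if_neg (show ¬(28 ≤ v ∧ v < 122 ∧ 12 ∣ v - 28) by omega), if_neg (show ¬(29 ≤ v ∧ v < 123 ∧ 12 ∣ v - 29) by omega), if_neg (show ¬(30 ≤ v ∧ v < 124 ∧ 12 ∣ v - 30) by omega), if_pos (show 31 ≤ v ∧ v < 125 ∧ 12 ∣ v - 31 by omega)]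
      rfl
    · rw [hk, if_neg (show ¬(26 ≤ v ∧ v < 120 ∧ 12 ∣ v - 26) by omega), if_neg (show ¬(27 ≤ v ∧ v < 121 ∧ 12 ∣ v - 27) by omega), if_neg (show ¬(28 ≤ v ∧ v < 122 ∧ 12 ∣ v - 28) by omega), if_neg (show ¬(29 ≤ v ∧ v < 123 ∧ 12 ∣ v - 29) by omega), if_neg (show ¬(30 ≤ v ∧ v < 124 ∧ 12 ∣ v - 30) by omega), if_neg (show ¬(31 ≤ v ∧ v < 125 ∧ 12 ∣ v - 31) by omega), if_pos (show 32 ≤ v ∧ v < 126 ∧ 12 ∣ v - 32 by omega)]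
      rfl
    · rw [hk, if_neg (show ¬(26 ≤ v ∧ v < 120 ∧ 12 ∣ v - 26) by omega), if_neg (show ¬(27 ≤ v ∧ v < 121 ∧ 12 ∣ v - 27) by omega), if_neg (show ¬(28 ≤ v ∧ v < 122 ∧ 12 ∣ v - 28) by omega), if_neg (show ¬(29 ≤ v ∧ v < 123 ∧ 12 ∣ v - 29) by omega), if_neg (show ¬(30 ≤ v ∧ v < 124 ∧ 12 ∣ v - 30) by omega), if_neg (show ¬(31 ≤ v ∧ v < 125 ∧ 12 ∣ v - 31) by omega), if_neg (show ¬(32 ≤ v ∧ v < 126 ∧ 12 ∣ v - 32) by omega), if_pos (show 33 ≤ v ∧ v < 127 ∧ 12 ∣ v - 33 by omega)]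
      rfl
  · rw [if_neg hP]
    unfold colName
    rw [if_neg (show ¬(26 ≤ v ∧ v < 120 ∧ 12 ∣ v - 26) by omega), if_neg (show ¬(27 ≤ v ∧ v < 121 ∧ 12 ∣ v - 27) by omega), if_neg (show ¬(28 ≤ v ∧ v < 122 ∧ 12 ∣ v - 28) by omega), if_neg (show ¬(29 ≤ v ∧ v < 123 ∧ 12 ∣ v - 29) by omega), if_neg (show ¬(30 ≤ v ∧ v < 124 ∧ 12 ∣ v - 30) by omega), if_neg (show ¬(31 ≤ v ∧ v < 125 ∧ 12 ∣ v - 31) by omega), if_neg (show ¬(32 ≤ v ∧ v < 126 ∧ 12 ∣ v - 32) by omega), if_neg (show ¬(33 ≤ v ∧ v < 127 ∧ 12 ∣ v - 33) by omega)]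

lemma step_eq : stepA = stepB := by
  funext st move
  simp only [stepA, stepB]
  rw [PySem.List.foldl_prod_mk
        (f := fun a i => if ((PySem.List.pyGet? pyRows i).getD []).contains move.1 then i + 1 else a)
        (g := fun a i => if ((PySem.List.pyGet? pyRows i).getD []).contains move.2 then i + 1 else a),
      PySem.List.foldl_prod_mk
        (f := fun a i => if ((PySem.List.pyGet? pyColumns i).getD []).contains move.1 then (pyCol.get? i).getD "" else a)
        (g := fun a i => if ((PySem.List.pyGet? pyColumns i).getD []).contains move.2 then (pyCol.get? i).getD "" else a)]
  rw [row_scan, row_scan, col_scan, col_scan]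
  rw [show (if 0 ≤ move.1 - 26 ∧ move.1 - 26 ≤ 91 ∧ PySem.Int.mod (move.1 - 26) 12 < 8
        then (8 - PySem.Int.floordiv (move.1 - 26) 12,
              ((PySem.Str.pyGet? "abcdefgh" (PySem.Int.mod (move.1 - 26) 12)).map (fun c => c.toString)).getD "")
        else (st.2.1, st.2.2.2.1))
      = (rowName move.1 st.2.1, colName move.1 st.2.2.2.1) from by
        rw [← arith_row move.1 st.2.1, ← arith_col move.1 st.2.2.2.1]; split_ifs <;> rfl,
      show (if 0 ≤ move.2 - 26 ∧ move.2 - 26 ≤ 91 ∧ PySem.Int.mod (move.2 - 26) 12 < 8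
        then (8 - PySem.Int.floordiv (move.2 - 26) 12,
              ((PySem.Str.pyGet? "abcdefgh" (PySem.Int.mod (move.2 - 26) 12)).map (fun c => c.toString)).getD "")
        else (st.2.2.1, st.2.2.2.2))
      = (rowName move.2 st.2.2.1, colName move.2 st.2.2.2.2) from by
        rw [← arith_row move.2 st.2.2.1, ← arith_col move.2 st.2.2.2.2]; split_ifs <;> rfl]

-- ===== VERDICT (by name: the statement is the Claim_ definition above) =====
theorem readableMoves_spec : Claim_equal_readableMoves := by
  intro moves _
  unfold Spec_readableMoves readableMoves readableMoves_alt
  rw [step_eq]
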